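-- pv_equiv track=rewrite | github.com/hansweytjens/neurosymbolic_test | check_declare_violations.py | check_nonsuccession
-- ===== SOURCE A (Python) =====
-- def check_nonsuccession(seq, A, B, **_):
--     found_A = False
--     for act in seq:
--         if act == A:
--             found_A = True
--         elif found_A and act == B:
--             return True
--     return False
-- ===== SOURCE B (Python) =====
-- def check_nonsuccession(seq, A, B, **_):
--     seq = list(seq)
--     if A not in seq:
--         return False
--     i = seq.index(A)
--     return A != B and B in seq[i+1:]
-- ===== Notes on version B (the rewrite author's own statement) =====
-- stated objective: alternative
-- what changed: Replaces the stateful flag-carrying scan with a pivot decomposition: locate the first A with list.index, then test membership of B in the suffix after it (the A != B term reflects that an element equal to A can never count as the succeeding B).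
import Mathlib
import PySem

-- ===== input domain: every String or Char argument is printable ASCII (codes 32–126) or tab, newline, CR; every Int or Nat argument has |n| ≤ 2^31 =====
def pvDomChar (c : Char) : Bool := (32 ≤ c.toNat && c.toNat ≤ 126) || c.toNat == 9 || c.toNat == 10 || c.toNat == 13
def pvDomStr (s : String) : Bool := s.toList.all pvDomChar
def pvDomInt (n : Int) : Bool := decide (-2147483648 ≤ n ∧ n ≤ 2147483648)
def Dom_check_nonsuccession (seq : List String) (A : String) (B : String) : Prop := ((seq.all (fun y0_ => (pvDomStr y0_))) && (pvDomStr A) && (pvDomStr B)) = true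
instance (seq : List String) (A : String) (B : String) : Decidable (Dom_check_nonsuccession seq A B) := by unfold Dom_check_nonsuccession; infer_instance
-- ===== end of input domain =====

-- B replaces A's stateful flag-carrying scan with a pivot decomposition
-- (first index of A, then membership of B in the suffix); alternative, not faster.

-- ===== PORT A =====
-- the for-loop with the found_A flag, as structural recursion carrying the flag
def chkAuxA (A B : String) : List String → Bool → Bool
  | [], _ => false
  | act :: t, foundA =>
      if act == A then chkAuxA A B t true
      else if foundA && (act == B) then true
      else chkAuxA A B t foundA

def check_nonsuccession (seq : List String) (A : String) (B : String) : Bool :=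
  chkAuxA A B seq false

-- ===== PORT B =====
def check_nonsuccession_alt (seq : List String) (A : String) (B : String) : Bool :=
  match PySem.List.index? seq A with
  | none => false
  | some i => (A != B) && (PySem.List.slice seq (some ((i + 1 : Nat) : Int)) none).contains B

-- ===== PRECONDITION & SPEC =====
def Spec_check_nonsuccession (seq : List String) (A : String) (B : String) (out : Bool) : Prop := out = check_nonsuccession_alt seq A B
instance (seq : List String) (A : String) (B : String) (out : Bool) : Decidable (Spec_check_nonsuccession seq A B out) := by unfold Spec_check_nonsuccession; infer_instance

-- ===== CLAIM (what is proved, stated in full; the proofs are below) =====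
def Claim_equal_check_nonsuccession : Prop := ∀ (seq : List String) (A : String) (B : String), Dom_check_nonsuccession seq A B → Spec_check_nonsuccession seq A B (check_nonsuccession seq A B)

-- ===== LEMMAS AND PROOFS =====

-- once the flag is set, A's loop returns true iff some later element equals B and B ≠ A
lemma chkAuxA_true (A B : String) (l : List String) :
    chkAuxA A B l true = ((A != B) && l.contains B) := by
  induction l with
  | nil => simp [chkAuxA]
  | cons act t ih =>
      by_cases hA : act = A
      · subst hA
        by_cases hAB : act = B
        · subst hAB; simp [chkAuxA, ih]
        · simp [chkAuxA, ih, bne, Ne.symm hAB]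
      · by_cases hB : act = B
        · subst hB
          simp [chkAuxA, hA, bne]
          exact fun h => hA h.symm
        · simp [chkAuxA, hA, hB, ih, Ne.symm hB]

lemma chkAuxA_false (seq : List String) (A B : String) :
    chkAuxA A B seq false = check_nonsuccession_alt seq A B := by
  induction seq with
  | nil => simp [chkAuxA, check_nonsuccession_alt, PySem.List.index?]
  | cons act t ih =>
      by_cases hA : act = A
      · subst hA
        rw [show chkAuxA act B (act :: t) false = chkAuxA act B t true by simp [chkAuxA]]
        rw [chkAuxA_true]
        simp only [check_nonsuccession_alt, PySem.List.index?_cons_self, Nat.zero_add]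
        rw [PySem.List.slice_from_natCast]
        simp
      · rw [show chkAuxA A B (act :: t) false = chkAuxA A B t false by
              simp [chkAuxA, hA]]
        rw [ih]
        unfold check_nonsuccession_alt
        rw [PySem.List.index?_cons_of_ne t hA]
        cases h : PySem.List.index? t A with
        | none => simp
        | some i =>
            simp only [Option.map_some]
            rw [PySem.List.slice_from_natCast, PySem.List.slice_from_natCast]
            simp [List.drop_succ_cons]

-- ===== VERDICT (by name: the statement is the Claim_ definition above) =====
theorem check_nonsuccession_spec : Claim_equal_check_nonsuccession := by
  intro seq A B _
  unfold Spec_check_nonsuccession check_nonsuccession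
  exact chkAuxA_false seq A B
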